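-- pv_equiv track=rewrite | github.com/xuhongzhi/ParaMA | segmentation.py | get_seg_dict_by_token_dict
-- ===== SOURCE A (Python) =====
-- def get_seg_dict_by_token_dict(token_seg_dict):
--     seg_dict = {}
--     for word in token_seg_dict.keys():
--         if word in seg_dict: continue
--         wd_stack = [word]
--         while wd_stack:
--             wd = wd_stack[-1]
--             if wd in seg_dict:
--                 wd_stack.pop()
--                 continue
--             if wd in token_seg_dict:
--                 #morph, suffix, root, trans
--                 wd_morph, wd_suffix, wd_root, wd_trans = token_seg_dict[wd]
--                 if wd_suffix == '$' or wd_suffix == '':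
--                     seg_dict[wd] = ((wd_morph,), ((wd_root, wd_trans, wd_suffix),))
--                     wd_stack.pop()
--                     continue
--                 elif wd_root in seg_dict:
--                     #examples: loneliness = loneli (lonely -y+i) +ness;    lonely = lone () +ly
--                     #Alignment:
--                     #--REP: lone+ly -> lone+li
--                     #--DEL: en+force -> en+forc
--                     #--DUP: under+pin -> under+pinn
--                     rt_seg = seg_dict[wd_root]
--                     rt_morphs = rt_seg[0]
--                     morphs = []
--                     indx = 0
--                     for i in range(len(rt_morphs)-1):
--                         rt_morph = rt_morphs[i]
--                         morphs.append(wd_morph[indx:indx+len(rt_morph)])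
--                         indx += len(rt_morph)
--                     morphs.append(wd_morph[indx:])
--                     morphs.append(wd_suffix)
--                     components = list(rt_seg[1])
--                     components.append((wd_root, wd_trans, wd_suffix))
--                     seg_dict[wd] = (tuple(morphs), tuple(components))
--                     wd_stack.pop()
--                     continue
--                 else:
--                     wd_stack.append(wd_root)
--                     continue
--             else:
--                 #inferenced non-appeared root:
--                 #example: communicating = communicat + ing
--                 seg_dict[wd] = ((wd,), ((wd, '$', '$'),))
--                 wd_stack.pop()
--                 continue
--     return seg_dict
-- ===== SOURCE B (Python) =====
-- def get_seg_dict_by_token_dict(token_seg_dict):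
--     seg_dict = {}
--
--     def build_entry(wd_morph, wd_suffix, wd_root, wd_trans, rt_seg):
--         rt_morphs, rt_components = rt_seg
--         morphs = []
--         indx = 0
--         for rt_morph in rt_morphs[:-1]:
--             morphs.append(wd_morph[indx:indx + len(rt_morph)])
--             indx += len(rt_morph)
--         morphs.append(wd_morph[indx:])
--         morphs.append(wd_suffix)
--         return (tuple(morphs), rt_components + ((wd_root, wd_trans, wd_suffix),))
--
--     for word in token_seg_dict:
--         # phase 1: walk the root chain, collecting the unresolved derived words
--         chain = []
--         wd = word
--         while wd not in seg_dict and wd in token_seg_dict \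
--                 and token_seg_dict[wd][1] != '$' and token_seg_dict[wd][1] != '':
--             chain.append(wd)
--             wd = token_seg_dict[wd][2]
--         # phase 2: settle the terminal word, then build entries back up the chain
--         if wd not in seg_dict:
--             if wd in token_seg_dict:
--                 wd_morph, wd_suffix, wd_root, wd_trans = token_seg_dict[wd]
--                 seg_dict[wd] = ((wd_morph,), ((wd_root, wd_trans, wd_suffix),))
--             else:
--                 seg_dict[wd] = ((wd,), ((wd, '$', '$'),))
--         for w in reversed(chain):
--             wd_morph, wd_suffix, wd_root, wd_trans = token_seg_dict[w]
--             seg_dict[w] = build_entry(wd_morph, wd_suffix, wd_root, wd_trans,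
--                                       seg_dict[wd_root])
--     return seg_dict
-- ===== Notes on version B (the rewrite author's own statement) =====
-- stated objective: alternative
-- what changed: A resolves each word with a single explicit-stack while-loop that pushes unresolved roots and revisits each pending word; B makes two phases per word: walk the root chain forward collecting the unresolved derived words, then settle the terminal word and build the entries walking the chain backward, so no stack is maintained and each chain word is dispatched once.
import Mathlib
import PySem

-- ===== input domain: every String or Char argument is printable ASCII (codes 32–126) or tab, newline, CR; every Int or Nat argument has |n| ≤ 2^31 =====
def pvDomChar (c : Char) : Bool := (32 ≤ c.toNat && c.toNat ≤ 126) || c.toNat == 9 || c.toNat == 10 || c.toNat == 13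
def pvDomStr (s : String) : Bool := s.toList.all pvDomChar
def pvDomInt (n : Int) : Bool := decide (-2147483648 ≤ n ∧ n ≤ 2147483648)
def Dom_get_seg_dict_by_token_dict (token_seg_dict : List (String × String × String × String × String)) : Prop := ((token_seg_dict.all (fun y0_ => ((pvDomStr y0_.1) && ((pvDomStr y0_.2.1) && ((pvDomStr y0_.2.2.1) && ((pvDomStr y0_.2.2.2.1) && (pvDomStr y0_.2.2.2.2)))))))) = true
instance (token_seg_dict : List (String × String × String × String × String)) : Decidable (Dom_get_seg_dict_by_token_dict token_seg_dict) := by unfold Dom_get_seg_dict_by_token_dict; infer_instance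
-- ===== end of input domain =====

-- B replaces A's single explicit-stack while-loop (which revisits each pending word after
-- pushing its root) by a two-phase pass per word: walk the root chain forward collecting the
-- unresolved derived words, then settle the terminal word and build entries walking the chain
-- backward; objective: alternative (same cost, each chain word is examined once, no stack).

-- value stored in seg_dict: (morphs tuple, components tuple)
abbrev SegVal := List String × List (String × String × String)
abbrev SegD := PySem.Dict String SegVal
abbrev TSD := PySem.Dict String (String × String × String × String)

-- the Python argument is a dict: build it from the association list
def pvTsd (l : List (String × String × String × String × String)) : TSD :=
  PySem.Dict.ofList (l.map (fun e => (e.1, e.2)))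

-- ===== PORT A =====
-- the while-loop over the explicit stack; fuel = number of iterations still allowed
-- (none = still running: Python's loop diverges on cyclic root chains, see Pre_ below)
def loopA (tsd : TSD) (f : Nat) (stack : List String) (σ : SegD) : Option SegD :=
  match f with
  | 0 => none
  | f + 1 =>
    match stack with
    | [] => some σ
    | wd :: rest =>
      if σ.contains wd then loopA tsd f rest σ
      else
        match tsd.get? wd with
        | some (wd_morph, wd_suffix, wd_root, wd_trans) =>
          if wd_suffix = "$" ∨ wd_suffix = "" then
            loopA tsd f rest (σ.insert wd ([wd_morph], [(wd_root, wd_trans, wd_suffix)]))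
          else
            match σ.get? wd_root with
            | some rt_seg =>
              -- for i in range(len(rt_morphs)-1): morphs.append(wd_morph[indx:indx+len(rt_morph)]); indx += len(rt_morph)
              let st := (PySem.List.pyRange 0 ((rt_seg.1.length : Int) - 1) 1).foldl
                (fun (st : List String × Int) i =>
                  let rt_morph := PySem.List.pyGetD rt_seg.1 i ""
                  (st.1 ++ [PySem.Str.slice wd_morph (some st.2) (some (st.2 + (PySem.Str.len rt_morph : Int)))],
                   st.2 + (PySem.Str.len rt_morph : Int)))
                ([], (0 : Int))
              let morphs := st.1 ++ [PySem.Str.slice wd_morph (some st.2) none] ++ [wd_suffix]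
              loopA tsd f rest (σ.insert wd (morphs, rt_seg.2 ++ [(wd_root, wd_trans, wd_suffix)]))
            | none => loopA tsd f (wd_root :: wd :: rest) σ
        | none => loopA tsd f rest (σ.insert wd ([wd], [(wd, "$", "$")]))

def get_seg_dict_by_token_dict (token_seg_dict : List (String × String × String × String × String)) : List (String × List String × (List (String × String × String))) :=
  let tsd := pvTsd token_seg_dict
  ((tsd.keys.foldl (fun σ word => (loopA tsd (4 * token_seg_dict.length + 4) [word] σ).getD σ)
      PySem.Dict.empty)).items

-- ===== PORT B =====
-- B's helper build_entry(wd_morph, wd_suffix, wd_root, wd_trans, rt_seg)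
def buildEntryB (wd_morph wd_suffix wd_root wd_trans : String) (rt_seg : SegVal) : SegVal :=
  let st := (PySem.List.slice rt_seg.1 none (some (-1))).foldl
    (fun (st : List String × Int) rt_morph =>
      (st.1 ++ [PySem.Str.slice wd_morph (some st.2) (some (st.2 + (PySem.Str.len rt_morph : Int)))],
       st.2 + (PySem.Str.len rt_morph : Int)))
    ([], (0 : Int))
  (st.1 ++ [PySem.Str.slice wd_morph (some st.2) none] ++ [wd_suffix],
   rt_seg.2 ++ [(wd_root, wd_trans, wd_suffix)])

-- phase 1: the while-loop collecting the unresolved chain (fuel: diverges on cyclic chains)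
def chainWalk (tsd : TSD) (f : Nat) (wd : String) (σ : SegD) (acc : List String) :
    Option (List String × String) :=
  match f with
  | 0 => none
  | f + 1 =>
    if σ.contains wd then some (acc, wd)
    else
      match tsd.get? wd with
      | some (_, wd_suffix, wd_root, _) =>
        if wd_suffix = "$" ∨ wd_suffix = "" then some (acc, wd)
        else chainWalk tsd f wd_root σ (acc ++ [wd])
      | none => some (acc, wd)

-- phase 2a: settle the terminal word
def settleTerm (tsd : TSD) (wd : String) (σ : SegD) : SegD :=
  if σ.contains wd then σ
  else
    match tsd.get? wd with
    | some (wd_morph, wd_suffix, wd_root, wd_trans) =>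
      σ.insert wd ([wd_morph], [(wd_root, wd_trans, wd_suffix)])
    | none => σ.insert wd ([wd], [(wd, "$", "$")])

-- phase 2b: one step of the backward build loop (the fallback branches are unreachable:
-- chain words are keys of tsd and their root is already in seg_dict)
def buildUp (tsd : TSD) (σ : SegD) (w : String) : SegD :=
  match tsd.get? w with
  | some (wd_morph, wd_suffix, wd_root, wd_trans) =>
    match σ.get? wd_root with
    | some rt_seg => σ.insert w (buildEntryB wd_morph wd_suffix wd_root wd_trans rt_seg)
    | none => σ
  | none => σ

def get_seg_dict_by_token_dict_alt (token_seg_dict : List (String × String × String × String × String)) : List (String × List String × (List (String × String × String))) :=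
  let tsd := pvTsd token_seg_dict
  ((tsd.keys.foldl (fun σ word =>
      match chainWalk tsd (token_seg_dict.length + 2) word σ [] with
      | some (chain, term) => chain.reverse.foldl (buildUp tsd) (settleTerm tsd term σ)
      | none => σ)
    PySem.Dict.empty)).items

-- ===== PRECONDITION & SPEC =====
-- one step along a root chain: defined exactly when the word is a key whose suffix is not final
def stepRoot (tsd : TSD) (w : String) : Option String :=
  match tsd.get? w with
  | some (_, s, r, _) => if s = "$" ∨ s = "" then none else some r
  | none => none

-- Pre_ excludes exactly the inputs on which A never returns: a cyclic chain of root links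
-- makes A's while-loop (and B) diverge; on terminating inputs every chain leaves the
-- dictionary within token_seg_dict.length steps, so the iteration bound is no restriction.
def Pre_get_seg_dict_by_token_dict (token_seg_dict : List (String × String × String × String × String)) : Prop :=
  ∀ w ∈ (pvTsd token_seg_dict).keys,
    (fun o => o.bind (stepRoot (pvTsd token_seg_dict)))^[token_seg_dict.length + 1] (some w) = none
instance (token_seg_dict : List (String × String × String × String × String)) : Decidable (Pre_get_seg_dict_by_token_dict token_seg_dict) := by unfold Pre_get_seg_dict_by_token_dict; infer_instance

def pvWitness_get_seg_dict_by_token_dict : (List (String × String × String × String × String)) :=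
  [("lonely", "lone", "ly", "lone", "lonely"), ("lone", "lone", "$", "lone", "$")]

def Spec_get_seg_dict_by_token_dict (token_seg_dict : List (String × String × String × String × String)) (out : List (String × List String × (List (String × String × String)))) : Prop := out = get_seg_dict_by_token_dict_alt token_seg_dict
instance (token_seg_dict : List (String × String × String × String × String)) (out : List (String × List String × (List (String × String × String)))) : Decidable (Spec_get_seg_dict_by_token_dict token_seg_dict out) := by unfold Spec_get_seg_dict_by_token_dict; infer_instance

-- ===== CLAIM (what is proved, stated in full; the proofs are below) =====
def Claim_equal_get_seg_dict_by_token_dict : Prop := ∀ (token_seg_dict : List (String × String × String × String × String)), Dom_get_seg_dict_by_token_dict token_seg_dict → Pre_get_seg_dict_by_token_dict token_seg_dict → Spec_get_seg_dict_by_token_dict token_seg_dict (get_seg_dict_by_token_dict token_seg_dict)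

-- ===== LEMMAS AND PROOFS =====

-- length of the root chain from w (none = fuel exhausted); proof-only device
def clen? (tsd : TSD) (f : Nat) (w : String) : Option Nat :=
  match f with
  | 0 => none
  | f + 1 =>
    match stepRoot tsd w with
    | none => some 0
    | some r => (clen? tsd f r).map (· + 1)

theorem iterate_bind_none {g : String → Option String} (f : Nat) :
    (fun o => o.bind g)^[f] none = none := by
  induction f with
  | zero => rfl
  | succ f ih => rw [Function.iterate_succ_apply, Option.bind_none]; exact ih

theorem clen?_isSome_iff {tsd : TSD} (f : Nat) (w : String) :
    (clen? tsd f w).isSome = true ↔ (fun o => o.bind (stepRoot tsd))^[f] (some w) = none := by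
  induction f generalizing w with
  | zero => simp [clen?]
  | succ f ih =>
    rw [Function.iterate_succ_apply]
    simp only [clen?, Option.bind_some]
    cases hs : stepRoot tsd w with
    | none => simp [iterate_bind_none]
    | some r => simpa using ih r

theorem clen?_mono {tsd : TSD} {f g : Nat} {w : String} {c : Nat} (hfg : f ≤ g)
    (h : clen? tsd f w = some c) : clen? tsd g w = some c := by
  induction f generalizing g w c with
  | zero => simp [clen?] at h
  | succ f ih =>
    obtain ⟨g', rfl⟩ : ∃ g', g = g' + 1 := ⟨g - 1, by omega⟩
    simp only [clen?] at h ⊢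
    cases hs : stepRoot tsd w with
    | none => simpa [hs] using h
    | some r =>
      simp only [hs, Option.map_eq_some_iff] at h ⊢
      obtain ⟨c₀, h₀, rfl⟩ := h
      exact ⟨c₀, ih (by omega) h₀, rfl⟩

theorem clen?_det {tsd : TSD} {f g : Nat} {w : String} {c c' : Nat}
    (h : clen? tsd f w = some c) (h' : clen? tsd g w = some c') : c = c' := by
  have h1 := clen?_mono (Nat.le_max_left f g) h
  have h2 := clen?_mono (Nat.le_max_right f g) h'
  rw [h1] at h2; exact Option.some_inj.mp h2

theorem clen?_lt {tsd : TSD} {f : Nat} {w : String} {c : Nat}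
    (h : clen? tsd f w = some c) : c < f := by
  induction f generalizing w c with
  | zero => simp [clen?] at h
  | succ f ih =>
    simp only [clen?] at h
    cases hs : stepRoot tsd w with
    | none => simp [hs] at h; omega
    | some r =>
      simp only [hs, Option.map_eq_some_iff] at h
      obtain ⟨c₀, h₀, rfl⟩ := h
      have := ih h₀; omega

theorem loopA_mono {tsd : TSD} {f g : Nat} {st : List String} {σ x : SegD} (hfg : f ≤ g)
    (h : loopA tsd f st σ = some x) : loopA tsd g st σ = some x := by
  induction f generalizing g st σ x with
  | zero => simp [loopA] at h
  | succ f ih =>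
    obtain ⟨g', rfl⟩ : ∃ g', g = g' + 1 := ⟨g - 1, by omega⟩
    have hf : f ≤ g' := by omega
    cases st with
    | nil => simpa [loopA] using h
    | cons wd rest =>
      simp only [loopA] at h ⊢
      by_cases hc : σ.contains wd = true
      · simp only [hc, if_true] at h ⊢; exact ih hf h
      · simp only [hc, if_false, Bool.false_eq_true] at h ⊢
        cases hg : tsd.get? wd with
        | none => simp only [hg] at h ⊢; exact ih hf h
        | some v =>
          obtain ⟨m, s, r, t⟩ := v
          simp only [hg] at h ⊢
          by_cases hs : s = "$" ∨ s = ""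
          · simp only [if_pos hs] at h ⊢; exact ih hf h
          · simp only [if_neg hs] at h ⊢
            cases hr : σ.get? r with
            | some rt => simp only [hr] at h ⊢; exact ih hf h
            | none => simp only [hr] at h ⊢; exact ih hf h

theorem loopA_frame {tsd : TSD} {f₁ f₂ : Nat} {st rest : List String} {σ σ₁ σ₂ : SegD}
    (h₁ : loopA tsd f₁ st σ = some σ₁) (h₂ : loopA tsd f₂ rest σ₁ = some σ₂) :
    loopA tsd (f₁ + f₂) (st ++ rest) σ = some σ₂ := by
  induction f₁ generalizing st σ σ₁ with
  | zero => simp [loopA] at h₁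
  | succ f ih =>
    cases st with
    | nil =>
      simp only [loopA, Option.some_inj] at h₁
      subst h₁
      exact loopA_mono (by omega) h₂
    | cons wd st' =>
      have harith : f + 1 + f₂ = (f + f₂) + 1 := by omega
      rw [harith]
      simp only [loopA, List.cons_append] at h₁ ⊢
      by_cases hc : σ.contains wd = true
      · simp only [hc, if_true] at h₁ ⊢; exact ih h₁ h₂
      · simp only [hc, if_false, Bool.false_eq_true] at h₁ ⊢
        cases hg : tsd.get? wd with
        | none => simp only [hg] at h₁ ⊢; exact ih h₁ h₂
        | some v =>
          obtain ⟨m, s, r, t⟩ := v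
          simp only [hg] at h₁ ⊢
          by_cases hs : s = "$" ∨ s = ""
          · simp only [if_pos hs] at h₁ ⊢; exact ih h₁ h₂
          · simp only [if_neg hs] at h₁ ⊢
            cases hr : σ.get? r with
            | some rt => simp only [hr] at h₁ ⊢; exact ih h₁ h₂
            | none =>
              simp only [hr] at h₁ ⊢
              exact ih (st := r :: wd :: st') h₁ h₂

theorem chainWalk_mono {tsd : TSD} {f g : Nat} {w : String} {σ : SegD} {acc : List String}
    {p : List String × String} (hfg : f ≤ g)
    (h : chainWalk tsd f w σ acc = some p) : chainWalk tsd g w σ acc = some p := by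
  induction f generalizing g w acc with
  | zero => simp [chainWalk] at h
  | succ f ih =>
    obtain ⟨g', rfl⟩ : ∃ g', g = g' + 1 := ⟨g - 1, by omega⟩
    simp only [chainWalk] at h ⊢
    by_cases hc : σ.contains w = true
    · simpa [hc] using h
    · simp only [hc, if_false, Bool.false_eq_true] at h ⊢
      cases hg : tsd.get? w with
      | none => simpa [hg] using h
      | some v =>
        obtain ⟨m, s, r, t⟩ := v
        simp only [hg] at h ⊢
        by_cases hs : s = "$" ∨ s = ""
        · simpa [if_pos hs] using h
        · simp only [if_neg hs] at h ⊢
          exact ih (by omega) h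

theorem chainWalk_acc {tsd : TSD} (f : Nat) (w : String) (σ : SegD) (acc : List String) :
    chainWalk tsd f w σ acc = (chainWalk tsd f w σ []).map (fun p => (acc ++ p.1, p.2)) := by
  induction f generalizing w acc with
  | zero => simp [chainWalk]
  | succ f ih =>
    simp only [chainWalk]
    by_cases hc : σ.contains w = true
    · simp [hc]
    · simp only [hc, if_false, Bool.false_eq_true]
      cases hg : tsd.get? w with
      | none => simp
      | some v =>
        obtain ⟨m, s, r, t⟩ := v
        by_cases hs : s = "$" ∨ s = ""
        · simp [if_pos hs]
        · simp only [if_neg hs]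
          rw [ih, ih (acc := [] ++ [w])]
          cases chainWalk tsd f r σ [] with
          | none => simp
          | some q => simp

-- the inline morphs-building loop of A equals the loop inside B's build_entry helper
theorem foldA_eq_foldB (wd_morph : String) (rt_morphs : List String) :
    (PySem.List.pyRange 0 ((rt_morphs.length : Int) - 1) 1).foldl
      (fun (st : List String × Int) i =>
        let rt_morph := PySem.List.pyGetD rt_morphs i ""
        (st.1 ++ [PySem.Str.slice wd_morph (some st.2) (some (st.2 + (PySem.Str.len rt_morph : Int)))],
         st.2 + (PySem.Str.len rt_morph : Int)))
      ([], (0 : Int)) =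
    (PySem.List.slice rt_morphs none (some (-1))).foldl
      (fun (st : List String × Int) rt_morph =>
        (st.1 ++ [PySem.Str.slice wd_morph (some st.2) (some (st.2 + (PySem.Str.len rt_morph : Int)))],
         st.2 + (PySem.Str.len rt_morph : Int)))
      ([], (0 : Int)) := by
  rw [PySem.List.slice_to_neg_one]
  rcases rt_morphs.eq_nil_or_concat with hrt | ⟨ys, y, hrt⟩
  · subst hrt; simp [PySem.List.pyRange_one_eq_nil (by norm_num : (-1 : Int) ≤ 0)]
  · have hb : ((rt_morphs.length : Int) - 1) = ((rt_morphs.dropLast.length : Nat) : Int) := by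
      subst hrt; simp
    rw [hb]
    rw [PySem.List.foldl_congr_mem _ _
        (fun (st : List String × Int) i =>
          let rt_morph := PySem.List.pyGetD rt_morphs.dropLast i ""
          (st.1 ++ [PySem.Str.slice wd_morph (some st.2) (some (st.2 + (PySem.Str.len rt_morph : Int)))],
           st.2 + (PySem.Str.len rt_morph : Int))) _ ?_]
    · exact PySem.List.foldl_pyRange_zero_pyGetD' rt_morphs.dropLast ""
        (fun (st : List String × Int) rt_morph =>
          (st.1 ++ [PySem.Str.slice wd_morph (some st.2) (some (st.2 + (PySem.Str.len rt_morph : Int)))],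
           st.2 + (PySem.Str.len rt_morph : Int))) ([], (0 : Int))
    · intro acc x hx
      rw [PySem.List.mem_pyRange_one] at hx
      have hget : PySem.List.pyGetD rt_morphs x "" = PySem.List.pyGetD rt_morphs.dropLast x "" := by
        rw [PySem.List.pyGetD_of_nonneg _ _ hx.1, PySem.List.pyGetD_of_nonneg _ _ hx.1]
        have hlt : x.toNat < rt_morphs.dropLast.length := by
          rw [List.length_dropLast] at hx ⊢; omega
        rw [List.getD_eq_getElem?_getD, List.getD_eq_getElem?_getD,
          List.getElem?_eq_getElem hlt, List.getElem?_eq_getElem (by rw [List.length_dropLast] at hlt; omega)]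
        simp [List.getElem_dropLast]
      simp only [hget]

-- the resolving iteration of A: one word whose root is already resolved
theorem loopA_build {tsd : TSD} {σ : SegD} {w m s r t : String} {rt : SegVal} (k : Nat)
    (hc : σ.contains w = false) (hg : tsd.get? w = some (m, s, r, t))
    (hs : ¬(s = "$" ∨ s = "")) (hr : σ.get? r = some rt) :
    loopA tsd (k + 2) [w] σ = some (σ.insert w (buildEntryB m s r t rt)) := by
  have harith : k + 2 = (k + 1) + 1 := rfl
  rw [harith]
  simp only [loopA, hc, Bool.false_eq_true, if_false, hg, if_neg hs, hr]
  rw [foldA_eq_foldB]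
  simp [buildEntryB]

-- single-step unfoldings of the two loops (fuel kept symbolic so nothing over-unfolds)
theorem chainWalk_step {tsd : TSD} {σ : SegD} {w m s r t : String} {acc : List String} (f : Nat)
    (hc : σ.contains w = false) (hg : tsd.get? w = some (m, s, r, t))
    (hs : ¬(s = "$" ∨ s = "")) :
    chainWalk tsd (f + 1) w σ acc = chainWalk tsd f r σ (acc ++ [w]) := by
  simp only [chainWalk, hc, Bool.false_eq_true, if_false, hg, if_neg hs]

theorem chainWalk_hit {tsd : TSD} {σ : SegD} {w : String} {acc : List String} (f : Nat)
    (hc : σ.contains w = true) :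
    chainWalk tsd (f + 1) w σ acc = some (acc, w) := by
  simp only [chainWalk, hc, if_true]

theorem loopA_push {tsd : TSD} {σ : SegD} {w m s r t : String} {rest : List String} (f : Nat)
    (hc : σ.contains w = false) (hg : tsd.get? w = some (m, s, r, t))
    (hs : ¬(s = "$" ∨ s = "")) (hr : σ.get? r = none) :
    loopA tsd (f + 1) (w :: rest) σ = loopA tsd f (r :: w :: rest) σ := by
  simp only [loopA, hc, Bool.false_eq_true, if_false, hg, if_neg hs, hr]

-- main simulation: resolving one word does the same thing in both programs
theorem mainSim (tsd : TSD) :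
    ∀ c f w σ, clen? tsd f w = some c →
      ∃ σ', loopA tsd (4 * c + 4) [w] σ = some σ' ∧
        (∃ pr, chainWalk tsd (c + 2) w σ [] = some pr ∧
          pr.1.reverse.foldl (buildUp tsd) (settleTerm tsd pr.2 σ) = σ') ∧
        σ'.contains w = true ∧
        (∀ x, σ'.contains x = true → σ.contains x = true ∨ ∃ c' ≤ c, ∃ g, clen? tsd g x = some c') := by
  intro c
  induction c using Nat.strong_induction_on with
  | _ c ih =>
  intro f w σ h
  obtain ⟨f', rfl⟩ : ∃ f', f = f' + 1 := by
    cases f with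
    | zero => simp [clen?] at h
    | succ f' => exact ⟨f', rfl⟩
  by_cases hc : σ.contains w = true
  · -- the word is already resolved: both sides do nothing
    refine ⟨σ, ?_, ⟨([], w), ?_, ?_⟩, hc, fun x hx => Or.inl hx⟩
    · exact loopA_mono (by omega) (show loopA tsd 2 [w] σ = some σ by simp [loopA, hc])
    · have harith : c + 2 = (c + 1) + 1 := rfl
      rw [harith]; simp [chainWalk, hc]
    · simp [settleTerm, hc]
  · rw [Bool.not_eq_true] at hc
    cases hg : tsd.get? w with
    | none =>
      -- inferred non-appeared root
      have hstep : stepRoot tsd w = none := by simp [stepRoot, hg]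
      have hc0 : c = 0 := by simp [clen?, hstep] at h; omega
      subst hc0
      refine ⟨σ.insert w ([w], [(w, "$", "$")]), ?_, ⟨([], w), ?_, ?_⟩, ?_, ?_⟩
      · norm_num; simp [loopA, hc, hg]
      · simp [chainWalk, hc, hg]
      · simp [settleTerm, hc, hg]
      · simp [PySem.Dict.contains_insert_self]
      · intro x hx
        rw [PySem.Dict.contains_insert] at hx
        rcases Bool.or_eq_true_iff.mp hx with hxw | hxσ
        · exact Or.inr ⟨0, le_refl 0, f' + 1, by rwa [show x = w from by simpa using hxw]⟩
        · exact Or.inl hxσ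
    | some v =>
      obtain ⟨m, s, r, t⟩ := v
      by_cases hs : s = "$" ∨ s = ""
      · -- final suffix: a base entry
        have hstep : stepRoot tsd w = none := by simp [stepRoot, hg, hs]
        have hc0 : c = 0 := by simp [clen?, hstep] at h; omega
        subst hc0
        refine ⟨σ.insert w ([m], [(r, t, s)]), ?_, ⟨([], w), ?_, ?_⟩, ?_, ?_⟩
        · norm_num; simp [loopA, hc, hg, hs]
        · simp [chainWalk, hc, hg, hs]
        · simp [settleTerm, hc, hg]
        · simp [PySem.Dict.contains_insert_self]
        · intro x hx
          rw [PySem.Dict.contains_insert] at hx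
          rcases Bool.or_eq_true_iff.mp hx with hxw | hxσ
          · exact Or.inr ⟨0, le_refl 0, f' + 1, by rwa [show x = w from by simpa using hxw]⟩
          · exact Or.inl hxσ
      · -- derived word: follow the root
        have hstep : stepRoot tsd w = some r := by simp [stepRoot, hg, hs]
        obtain ⟨c₀, hr0, rfl⟩ : ∃ c₀, clen? tsd f' r = some c₀ ∧ c = c₀ + 1 := by
          simp only [clen?, hstep, Option.map_eq_some_iff] at h
          obtain ⟨c₀, h₀, hh⟩ := h
          exact ⟨c₀, h₀, hh.symm⟩
        cases hrσ : σ.get? r with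
        | some rt =>
          -- the root is already resolved: a single build step on both sides
          have hcr : σ.contains r = true := by
            rw [PySem.Dict.contains_eq_isSome_get?, hrσ]; rfl
          refine ⟨σ.insert w (buildEntryB m s r t rt), ?_, ⟨([w], r), ?_, ?_⟩, ?_, ?_⟩
          · exact loopA_mono (by omega) (loopA_build 1 hc hg hs hrσ)
          · show chainWalk tsd ((c₀ + 2) + 1) w σ [] = some ([w], r)
            rw [chainWalk_step _ hc hg hs]
            exact chainWalk_hit _ hcr
          · simp [settleTerm, hcr, buildUp, hg, hrσ]
          · simp [PySem.Dict.contains_insert_self]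
          · intro x hx
            rw [PySem.Dict.contains_insert] at hx
            rcases Bool.or_eq_true_iff.mp hx with hxw | hxσ
            · exact Or.inr ⟨c₀ + 1, le_refl _, f' + 1, by rwa [show x = w from by simpa using hxw]⟩
            · exact Or.inl hxσ
        | none =>
          -- the root is unresolved: resolve it first (IH), then build
          obtain ⟨σ₁, A₁, ⟨pr₁, CW₁, FB₁⟩, Cr₁, K₁⟩ := ih c₀ (by omega) f' r σ hr0
          have hw1 : σ₁.contains w = false := by
            rw [Bool.eq_false_iff]
            intro hcw
            rcases K₁ w hcw with hws | ⟨c', hc', g, hg'⟩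
            · rw [hc] at hws; exact Bool.false_ne_true hws
            · have := clen?_det h hg'; omega
          obtain ⟨rt₁, hrt₁⟩ : ∃ rt₁, σ₁.get? r = some rt₁ := by
            rw [PySem.Dict.contains_eq_isSome_get?] at Cr₁
            cases hq : σ₁.get? r with
            | none => rw [hq] at Cr₁; simp at Cr₁
            | some q => exact ⟨q, rfl⟩
          refine ⟨σ₁.insert w (buildEntryB m s r t rt₁), ?_, ⟨([w] ++ pr₁.1, pr₁.2), ?_, ?_⟩, ?_, ?_⟩
          · -- A pushes the root, resolves it, then revisits w
            have hfr := loopA_frame (f₂ := 3) A₁ (loopA_build 1 hw1 hg hs hrt₁)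
            have harith : 4 * (c₀ + 1) + 4 = (4 * c₀ + 4 + 3) + 1 := by omega
            rw [harith, loopA_push _ hc hg hs hrσ]
            simpa using hfr
          · show chainWalk tsd ((c₀ + 2) + 1) w σ [] = _
            rw [chainWalk_step _ hc hg hs, chainWalk_acc, CW₁]
            rfl
          · simp only [List.reverse_append, List.reverse_singleton, List.foldl_append]
            rw [FB₁]
            simp [buildUp, hg, hrt₁]
          · simp [PySem.Dict.contains_insert_self]
          · intro x hx
            rw [PySem.Dict.contains_insert] at hx
            rcases Bool.or_eq_true_iff.mp hx with hxw | hxσ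
            · exact Or.inr ⟨c₀ + 1, le_refl _, f' + 1, by rwa [show x = w from by simpa using hxw]⟩
            · rcases K₁ x hxσ with hl | ⟨c', hc', g, hg'⟩
              · exact Or.inl hl
              · exact Or.inr ⟨c', by omega, g, hg'⟩

-- the outer loop over the keys, word by word
theorem outerFold (tsd : TSD) (n : Nat) :
    ∀ (ws : List String) (σ : SegD),
      (∀ w ∈ ws, ∃ c, c ≤ n ∧ ∃ f, clen? tsd f w = some c) →
      ws.foldl (fun σ word => (loopA tsd (4 * n + 4) [word] σ).getD σ) σ =
      ws.foldl (fun σ word =>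
        match chainWalk tsd (n + 2) word σ [] with
        | some (chain, term) => chain.reverse.foldl (buildUp tsd) (settleTerm tsd term σ)
        | none => σ) σ := by
  intro ws
  induction ws with
  | nil => intro σ _; rfl
  | cons w ws ihw =>
    intro σ hws
    obtain ⟨c, hcn, f, hcf⟩ := hws w (List.mem_cons_self ..)
    obtain ⟨σ', A', ⟨pr, CW, FB⟩, -, -⟩ := mainSim tsd c f w σ hcf
    have hA : (loopA tsd (4 * n + 4) [w] σ).getD σ = σ' := by
      rw [loopA_mono (by omega) A']; rfl
    obtain ⟨ch, tm⟩ := pr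
    have hB : (match chainWalk tsd (n + 2) w σ [] with
        | some (chain, term) => chain.reverse.foldl (buildUp tsd) (settleTerm tsd term σ)
        | none => σ) = σ' := by
      rw [chainWalk_mono (by omega) CW]
      exact FB
    simp only [List.foldl_cons, hA, hB]
    exact ihw σ' (fun w' hw' => hws w' (List.mem_cons_of_mem _ hw'))

-- ===== VERDICT (by name: the statement is the Claim_ definition above) =====
theorem get_seg_dict_by_token_dict_spec : Claim_equal_get_seg_dict_by_token_dict := by
  unfold Claim_equal_get_seg_dict_by_token_dict
  intro l _ hPre
  unfold Spec_get_seg_dict_by_token_dict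
  show ((((pvTsd l).keys.foldl (fun σ word => (loopA (pvTsd l) (4 * l.length + 4) [word] σ).getD σ)
      PySem.Dict.empty)).items) =
    ((((pvTsd l).keys.foldl (fun σ word =>
      match chainWalk (pvTsd l) (l.length + 2) word σ [] with
      | some (chain, term) => chain.reverse.foldl (buildUp (pvTsd l)) (settleTerm (pvTsd l) term σ)
      | none => σ)
    PySem.Dict.empty)).items)
  refine congrArg PySem.Dict.items ?_
  refine outerFold (pvTsd l) l.length (pvTsd l).keys PySem.Dict.empty ?_
  intro w hw
  have hsome : (clen? (pvTsd l) (l.length + 1) w).isSome = true :=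
    (clen?_isSome_iff _ _).mpr (hPre w hw)
  obtain ⟨c, hcf⟩ : ∃ c, clen? (pvTsd l) (l.length + 1) w = some c := by
    cases hq : clen? (pvTsd l) (l.length + 1) w with
    | none => rw [hq] at hsome; simp at hsome
    | some c => exact ⟨c, rfl⟩
  exact ⟨c, by have := clen?_lt hcf; omega, _, hcf⟩
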